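-- pv_equiv track=rewrite | github.com/cfreedman/aoc2024 | day9-1.py | generate_full_disk_map
-- ===== SOURCE A (Python) =====
-- def generate_full_disk_map(disk_map):
--     fill_segs = []
--     spaces = []
--
--     fill = True
--     id = 0
--     curr_idx = 0
--
--     for num in disk_map:
--         num = int(num)
--         if fill:
--             fill_segs.append([curr_idx, curr_idx + num])
--             fill = False
--         else:
--             spaces.append([curr_idx, curr_idx + num])
--             fill = True
--         curr_idx += num
--
--     return fill_segs, spaces
-- ===== SOURCE B (Python) =====
-- def generate_full_disk_map(disk_map):
--     nums = [int(n) for n in disk_map]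
--     offsets = [0]
--     for n in nums:
--         offsets.append(offsets[-1] + n)
--     fill_segs = []
--     spaces = []
--     for i, (a, b) in enumerate(zip(offsets, offsets[1:])):
--         (fill_segs if i % 2 == 0 else spaces).append([a, b])
--     return fill_segs, spaces
-- ===== Notes on version B (the rewrite author's own statement) =====
-- stated objective: alternative
-- what changed: B builds the full prefix-sum table of boundary offsets first, then zips consecutive boundaries into intervals and splits them by index parity, instead of threading a running index and a fill/space flag through one loop.
import Mathlib
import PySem

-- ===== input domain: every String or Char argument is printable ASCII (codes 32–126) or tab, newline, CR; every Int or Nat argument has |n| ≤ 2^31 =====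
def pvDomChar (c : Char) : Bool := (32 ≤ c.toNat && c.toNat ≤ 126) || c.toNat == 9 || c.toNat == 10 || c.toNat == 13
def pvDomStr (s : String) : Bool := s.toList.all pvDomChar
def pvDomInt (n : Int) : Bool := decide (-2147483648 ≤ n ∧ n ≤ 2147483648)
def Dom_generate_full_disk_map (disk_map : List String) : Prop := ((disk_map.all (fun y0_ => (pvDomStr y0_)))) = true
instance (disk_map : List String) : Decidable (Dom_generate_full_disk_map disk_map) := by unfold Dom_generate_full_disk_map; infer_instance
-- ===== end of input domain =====

-- B replaces A's single loop threading a running index and fill/space flag by a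
-- prefix-sum boundary table, zipped into intervals and split by index parity
-- (objective: alternative decomposition, same cost).


-- ===== PORT A =====
-- A's loop: state (fill_segs, spaces, fill, curr_idx); int(num) is PySem.Int.ofStr?
-- (.getD 0 is never reached under Pre_, which demands every element parse).
def generate_full_disk_map (disk_map : List String) : List (List Int) × List (List Int) :=
  let r := disk_map.foldl
    (fun (st : List (List Int) × List (List Int) × Bool × Int) numS =>
      let num := (PySem.Int.ofStr? numS).getD 0
      let fs := st.1; let sp := st.2.1; let fill := st.2.2.1; let curr_idx := st.2.2.2
      if fill then (fs ++ [[curr_idx, curr_idx + num]], sp, false, curr_idx + num)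
      else (fs, sp ++ [[curr_idx, curr_idx + num]], true, curr_idx + num))
    ([], [], true, 0)
  (r.1, r.2.1)

-- ===== PORT B =====
-- B: nums, then the offsets table (append running sum), then zip consecutive
-- boundaries, then one enumerate pass splitting by index parity. enumerate
-- indices are nonnegative, where Lean's Int % coincides with Python's %.
def generate_full_disk_map_alt (disk_map : List String) : List (List Int) × List (List Int) :=
  let nums := disk_map.map (fun n => (PySem.Int.ofStr? n).getD 0)
  let offsets := nums.foldl (fun acc n => acc ++ [PySem.List.pyGetD acc (-1) 0 + n]) [(0 : Int)]
  let pairs := offsets.zip offsets.tail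
  (PySem.List.enumerate pairs 0).foldl
    (fun (st : List (List Int) × List (List Int)) p =>
      if p.1 % 2 = 0 then (st.1 ++ [[p.2.1, p.2.2]], st.2) else (st.1, st.2 ++ [[p.2.1, p.2.2]]))
    ([], [])

-- ===== PRECONDITION & SPEC =====
-- Pre_ excludes exactly the inputs where Python's int() raises ValueError (both A and B raise there).
def Pre_generate_full_disk_map (disk_map : List String) : Prop :=
  ∀ s ∈ disk_map, (PySem.Int.ofStr? s).isSome
instance (disk_map : List String) : Decidable (Pre_generate_full_disk_map disk_map) := by
  unfold Pre_generate_full_disk_map; infer_instance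
def pvWitness_generate_full_disk_map : List String := ["2", "3", "1", "4"]

def Spec_generate_full_disk_map (disk_map : List String) (out : List (List Int) × List (List Int)) : Prop := out = generate_full_disk_map_alt disk_map
instance (disk_map : List String) (out : List (List Int) × List (List Int)) : Decidable (Spec_generate_full_disk_map disk_map out) := by unfold Spec_generate_full_disk_map; infer_instance

-- ===== CLAIM (what is proved, stated in full; the proofs are below) =====
def Claim_equal_generate_full_disk_map : Prop := ∀ (disk_map : List String), Dom_generate_full_disk_map disk_map → Pre_generate_full_disk_map disk_map → Spec_generate_full_disk_map disk_map (generate_full_disk_map disk_map)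

-- ===== LEMMAS AND PROOFS =====

-- Reference decomposition: alternating segments of a list of lengths from a start index.
def pvSegs : List Int → Int → List (List Int) × List (List Int)
  | [], _ => ([], [])
  | n :: rest, idx =>
      let s := pvSegs rest (idx + n)
      ([idx, idx + n] :: s.2, s.1)

-- Offsets after the start index.
def pvOffs : List Int → Int → List Int
  | [], _ => []
  | n :: rest, x => (x + n) :: pvOffs rest (x + n)

-- Consecutive boundary pairs.
def pvPairs : List Int → Int → List (Int × Int)
  | [], _ => []
  | n :: rest, x => (x, x + n) :: pvPairs rest (x + n)

theorem pvA_fold (l : List String) (fs sp : List (List Int)) (fill : Bool) (idx : Int) :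
    l.foldl
      (fun (st : List (List Int) × List (List Int) × Bool × Int) numS =>
        let num := (PySem.Int.ofStr? numS).getD 0
        let fs := st.1; let sp := st.2.1; let fill := st.2.2.1; let curr_idx := st.2.2.2
        if fill then (fs ++ [[curr_idx, curr_idx + num]], sp, false, curr_idx + num)
        else (fs, sp ++ [[curr_idx, curr_idx + num]], true, curr_idx + num))
      (fs, sp, fill, idx)
    = (if fill then
        (fs ++ (pvSegs (l.map (fun n => (PySem.Int.ofStr? n).getD 0)) idx).1,
         sp ++ (pvSegs (l.map (fun n => (PySem.Int.ofStr? n).getD 0)) idx).2,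
         fill.xor (decide (l.length % 2 = 1)), idx + (l.map (fun n => (PySem.Int.ofStr? n).getD 0)).sum)
      else
        (fs ++ (pvSegs (l.map (fun n => (PySem.Int.ofStr? n).getD 0)) idx).2,
         sp ++ (pvSegs (l.map (fun n => (PySem.Int.ofStr? n).getD 0)) idx).1,
         fill.xor (decide (l.length % 2 = 1)), idx + (l.map (fun n => (PySem.Int.ofStr? n).getD 0)).sum)) := by
  induction l generalizing fs sp fill idx with
  | nil => simp [pvSegs]
  | cons h t ih =>
      cases fill <;>
        simp only [List.foldl_cons, List.map_cons, pvSegs, List.sum_cons] <;>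
        rw [ih] <;>
        cases hb : decide (t.length % 2 = 1) <;>
        simp_all [List.length_cons, Nat.add_mod] <;> ring

theorem pvB_offsets (l : List Int) (a : List Int) (x : Int) :
    l.foldl (fun acc n => acc ++ [PySem.List.pyGetD acc (-1) 0 + n]) (a ++ [x])
    = a ++ x :: pvOffs l x := by
  induction l generalizing a x with
  | nil => simp [pvOffs]
  | cons n t ih =>
      simp only [List.foldl_cons, pvOffs]
      rw [PySem.List.pyGetD_neg_one_append_singleton, List.append_assoc]
      have := ih (a ++ [x]) (x + n)
      simpa using this

theorem pvB_zip (l : List Int) (x : Int) :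
    (x :: pvOffs l x).zip (pvOffs l x) = pvPairs l x := by
  induction l generalizing x with
  | nil => simp [pvOffs, pvPairs]
  | cons n t ih => simp [pvOffs, pvPairs, ih]

theorem pvB_fold (l : List Int) (k : Int) (fs sp : List (List Int)) (idx : Int) :
    (PySem.List.enumerate (pvPairs l idx) k).foldl
      (fun (st : List (List Int) × List (List Int)) p =>
        if p.1 % 2 = 0 then (st.1 ++ [[p.2.1, p.2.2]], st.2) else (st.1, st.2 ++ [[p.2.1, p.2.2]]))
      (fs, sp)
    = (if k % 2 = 0 then (fs ++ (pvSegs l idx).1, sp ++ (pvSegs l idx).2)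
       else (fs ++ (pvSegs l idx).2, sp ++ (pvSegs l idx).1)) := by
  induction l generalizing k fs sp idx with
  | nil => simp [pvPairs, pvSegs]
  | cons n t ih =>
      simp only [pvPairs, pvSegs, PySem.List.enumerate_cons, List.foldl_cons]
      by_cases h : k % 2 = 0
      · have h1 : ¬ (k + 1) % 2 = 0 := by omega
        simp only [h, if_true]
        rw [ih (k + 1), if_neg h1]
        simp
      · have h1 : (k + 1) % 2 = 0 := by omega
        simp only [h, if_false]
        rw [ih (k + 1), if_pos h1]
        simp

theorem pvA_segs (l : List String) :
    generate_full_disk_map l = pvSegs (l.map (fun n => (PySem.Int.ofStr? n).getD 0)) 0 := by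
  unfold generate_full_disk_map
  rw [pvA_fold]
  simp

theorem pvB_offsets0 (l : List Int) :
    l.foldl (fun acc n => acc ++ [PySem.List.pyGetD acc (-1) 0 + n]) [(0 : Int)]
    = 0 :: pvOffs l 0 := by
  simpa using pvB_offsets l [] 0

theorem pvB_segs (l : List String) :
    generate_full_disk_map_alt l = pvSegs (l.map (fun n => (PySem.Int.ofStr? n).getD 0)) 0 := by
  unfold generate_full_disk_map_alt
  simp only [pvB_offsets0, List.tail_cons, pvB_zip, pvB_fold _ 0]
  simp

-- ===== VERDICT (by name: the statement is the Claim_ definition above) =====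
theorem generate_full_disk_map_spec : Claim_equal_generate_full_disk_map := by
  intro l _ _
  unfold Spec_generate_full_disk_map
  rw [pvA_segs, pvB_segs]
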